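-- pv_equiv track=rewrite | github.com/manumei/ChirpID-backend | utils/data_processing.py | calculate_class_totals
-- ===== SOURCE A (Python) =====
-- def calculate_class_totals(audio_files):
--     """Calculate total potential segments per class."""
--     class_totals = {}
--
--     for audio_info in audio_files:
--         class_id = audio_info['class_id']
--         segments = audio_info['max_segments']
--
--         if class_id not in class_totals:
--             class_totals[class_id] = 0
--         class_totals[class_id] += segments
--
--     return class_totals
-- ===== SOURCE B (Python) =====
-- def calculate_class_totals(audio_files):
--     """Calculate total potential segments per class."""
--     keys = list(dict.fromkeys(af['class_id'] for af in audio_files))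
--     return {cid: sum(af['max_segments'] for af in audio_files
--                      if af['class_id'] == cid)
--             for cid in keys}
-- ===== Notes on version B (the rewrite author's own statement) =====
-- stated objective: alternative
-- what changed: Replaces the online dict accumulation (create-key-then-increment per element) with a two-pass grouped formulation: first collect the distinct class ids in first-seen order, then build each dict entry as a comprehension summing max_segments over the matching elements.
import Mathlib
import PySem

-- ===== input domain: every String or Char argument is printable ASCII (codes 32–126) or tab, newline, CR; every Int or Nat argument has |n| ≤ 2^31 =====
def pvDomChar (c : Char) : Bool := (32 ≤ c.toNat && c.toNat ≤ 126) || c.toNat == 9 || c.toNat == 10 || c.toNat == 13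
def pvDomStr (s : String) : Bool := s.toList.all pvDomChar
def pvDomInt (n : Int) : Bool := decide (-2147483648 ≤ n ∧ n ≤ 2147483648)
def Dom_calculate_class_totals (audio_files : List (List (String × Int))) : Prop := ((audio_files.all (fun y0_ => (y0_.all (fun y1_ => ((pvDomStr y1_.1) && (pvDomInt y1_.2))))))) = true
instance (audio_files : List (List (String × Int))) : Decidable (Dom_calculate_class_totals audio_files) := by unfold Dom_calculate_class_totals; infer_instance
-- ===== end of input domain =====

-- B replaces A's online dict accumulation by a two-pass grouped formulation (distinct ids first, then one sum per id); same results, alternative structure (not faster).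


-- shared primitive: Python's audio_info['key'] on a dict given as an assoc list
def pyKey (info : List (String × Int)) (k : String) : Option Int :=
  (PySem.Dict.ofList info).get? k

-- ===== PORT A =====
-- literal port of A's loop: for each entry read the two keys, create the key with 0 if absent, then add
def calculate_class_totals (audio_files : List (List (String × Int))) : List (Int × Int) :=
  (audio_files.foldl (fun d info =>
      match pyKey info "class_id", pyKey info "max_segments" with
      | some cid, some seg =>
          let d' := if d.contains cid then d else d.insert cid 0
          d'.insert cid (d'.getD cid 0 + seg)
      | _, _ => d   -- Python raises KeyError here; excluded by Pre_
    ) PySem.Dict.empty).items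

-- ===== PORT B =====
-- literal port of B: distinct class ids in first-seen order (dict.fromkeys), then one sum per id
def calculate_class_totals_alt (audio_files : List (List (String × Int))) : List (Int × Int) :=
  let keys := PySem.List.dedup (audio_files.filterMap (fun af => pyKey af "class_id"))
  keys.map (fun cid => (cid,
    (audio_files.filterMap (fun af =>
        match pyKey af "class_id" with
        | some c => if c == cid then pyKey af "max_segments" else none
        | none => none)).sum))

-- ===== PRECONDITION & SPEC =====
-- Pre_ excludes exactly the inputs where A raises KeyError: some entry lacks 'class_id' or 'max_segments'.
def Pre_calculate_class_totals (audio_files : List (List (String × Int))) : Prop :=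
  ∀ info ∈ audio_files,
    (PySem.Dict.ofList info).contains "class_id" = true ∧
    (PySem.Dict.ofList info).contains "max_segments" = true
instance (audio_files : List (List (String × Int))) : Decidable (Pre_calculate_class_totals audio_files) := by
  unfold Pre_calculate_class_totals; infer_instance
def pvWitness_calculate_class_totals : (List (List (String × Int))) :=
  [[("class_id", 1), ("max_segments", 2)], [("class_id", 1), ("max_segments", 3)]]
def Spec_calculate_class_totals (audio_files : List (List (String × Int))) (out : List (Int × Int)) : Prop := out = calculate_class_totals_alt audio_files
instance (audio_files : List (List (String × Int))) (out : List (Int × Int)) : Decidable (Spec_calculate_class_totals audio_files out) := by unfold Spec_calculate_class_totals; infer_instance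

-- ===== CLAIM (what is proved, stated in full; the proofs are below) =====
def Claim_equal_calculate_class_totals : Prop := ∀ (audio_files : List (List (String × Int))), Dom_calculate_class_totals audio_files → Pre_calculate_class_totals audio_files → Spec_calculate_class_totals audio_files (calculate_class_totals audio_files)

-- ===== LEMMAS AND PROOFS =====

-- the per-entry data A and B both consume: (class_id, max_segments), when both keys are present
def pvExtract (info : List (String × Int)) : Option (Int × Int) :=
  match pyKey info "class_id", pyKey info "max_segments" with
  | some c, some s => some (c, s)
  | _, _ => none

-- the accumulation step of A, on extracted pairs
def pvStep (d : PySem.Dict Int Int) (p : Int × Int) : PySem.Dict Int Int :=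
  let d' := if d.contains p.1 then d else d.insert p.1 0
  d'.insert p.1 (d'.getD p.1 0 + p.2)

-- B's value, on extracted pairs
def pvSum (pairs : List (Int × Int)) (cid : Int) : Int :=
  ((pairs.filter (fun p => p.1 == cid)).map (·.2)).sum

lemma a_reduces (l : List (List (String × Int))) (d : PySem.Dict Int Int) :
    l.foldl (fun d info =>
      match pyKey info "class_id", pyKey info "max_segments" with
      | some cid, some seg =>
          let d' := if d.contains cid then d else d.insert cid 0
          d'.insert cid (d'.getD cid 0 + seg)
      | _, _ => d) d
    = (l.filterMap pvExtract).foldl pvStep d := by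
  induction l generalizing d with
  | nil => rfl
  | cons info t ih =>
      simp only [List.foldl_cons, List.filterMap_cons]
      cases hc : pyKey info "class_id" <;> cases hs : pyKey info "max_segments" <;>
        simp [pvExtract, hc, hs, ih, pvStep]

lemma b_keys_reduces (l : List (List (String × Int)))
    (h : Pre_calculate_class_totals l) :
    l.filterMap (fun af => pyKey af "class_id") = (l.filterMap pvExtract).map (·.1) := by
  induction l with
  | nil => rfl
  | cons info t ih =>
      obtain ⟨h1, h2⟩ := h info (by simp)
      rw [PySem.Dict.contains_eq_isSome_get?] at h1 h2
      obtain ⟨c, hc⟩ := Option.isSome_iff_exists.mp h1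
      obtain ⟨s, hs⟩ := Option.isSome_iff_exists.mp h2
      have hK : pyKey info "class_id" = some c := hc
      have hS : pyKey info "max_segments" = some s := hs
      have hE : pvExtract info = some (c, s) := by rw [pvExtract, hK, hS]
      rw [List.filterMap_cons, List.filterMap_cons, hK, hE, List.map_cons]
      exact congrArg _ (ih (fun i hi => h i (List.mem_cons_of_mem _ hi)))

lemma b_sum_reduces (l : List (List (String × Int))) (cid : Int)
    (h : Pre_calculate_class_totals l) :
    (l.filterMap (fun af =>
        match pyKey af "class_id" with
        | some c => if c == cid then pyKey af "max_segments" else none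
        | none => none)).sum = pvSum (l.filterMap pvExtract) cid := by
  induction l with
  | nil => rfl
  | cons info t ih =>
      obtain ⟨h1, h2⟩ := h info (by simp)
      rw [PySem.Dict.contains_eq_isSome_get?] at h1 h2
      obtain ⟨c, hc⟩ := Option.isSome_iff_exists.mp h1
      obtain ⟨s, hs⟩ := Option.isSome_iff_exists.mp h2
      have hK : pyKey info "class_id" = some c := hc
      have hS : pyKey info "max_segments" = some s := hs
      have hE : pvExtract info = some (c, s) := by rw [pvExtract, hK, hS]
      have ih' := ih (fun i hi => h i (List.mem_cons_of_mem _ hi))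
      by_cases hcc : c = cid
      · have hhead : (match pyKey info "class_id" with
            | some c1 => if c1 == cid then pyKey info "max_segments" else none
            | none => none) = some s := by rw [hK]; simp [hcc, hS]
        simp only [List.filterMap_cons, hhead, hE, List.sum_cons, ih']
        simp [pvSum, hcc]
      · have hhead : (match pyKey info "class_id" with
            | some c1 => if c1 == cid then pyKey info "max_segments" else none
            | none => none) = none := by rw [hK]; simp [hcc]
        simp only [List.filterMap_cons, hhead, hE, ih']
        simp [pvSum, hcc]

lemma pvSum_append (t : List (Int × Int)) (c s c' : Int) :
    pvSum (t ++ [(c, s)]) c' = pvSum t c' + (if c = c' then s else 0) := by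
  by_cases h : c = c' <;> simp [pvSum, List.filter_append, h]

lemma core (pairs : List (Int × Int)) :
    (pairs.foldl pvStep PySem.Dict.empty).items
      = (PySem.Set.ofList (pairs.map (·.1))).map (fun c => (c, pvSum pairs c)) := by
  induction pairs using List.reverseRecOn with
  | nil => rfl
  | append_singleton t p ih =>
      obtain ⟨c, s⟩ := p
      rw [List.foldl_append, List.foldl_cons, List.foldl_nil,
        show (t ++ [(c, s)]).map (fun x => x.1) = t.map (fun x => x.1) ++ [c] by simp,
        PySem.Set.ofList_append_singleton]
      set d := t.foldl pvStep PySem.Dict.empty with hd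
      have hkeys : d.keys = PySem.Set.ofList (t.map (·.1)) := by
        have h0 : d.keys = d.items.map (·.1) := rfl
        rw [h0, ih, List.map_map]
        exact List.map_id' _
      have hnd : d.keys.Nodup := hkeys ▸ PySem.Set.nodup_ofList _
      by_cases hmem : c ∈ PySem.Set.ofList (t.map (·.1))
      · have hcont : d.contains c = true := by
          rw [PySem.Dict.contains_eq_decide_mem_keys, hkeys]; simpa using hmem
        have hitem : (c, pvSum t c) ∈ d.items := by
          rw [ih]; exact List.mem_map.mpr ⟨c, hmem, rfl⟩
        have hgetD : d.getD c 0 = pvSum t c := PySem.Dict.getD_of_mem_items _ hitem hnd 0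
        simp only [pvStep, hcont, if_true, hgetD]
        rw [PySem.Dict.items_insert_of_contains _ _ hcont, ih,
          PySem.Set.add_of_mem hmem, List.map_map]
        refine List.map_congr_left (fun c' _ => ?_)
        by_cases h : c' = c
        · subst h; simp [pvSum_append]
        · have h' : c ≠ c' := fun e => h e.symm
          simp [h, h', pvSum_append]
      · have hcont : d.contains c = false := by
          rw [PySem.Dict.contains_eq_decide_mem_keys, hkeys]; simpa using hmem
        have hz : pvSum t c = 0 := by
          have : t.filter (fun p => p.1 == c) = [] :=
            List.filter_eq_nil_iff.mpr (fun p hp => by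
              simp only [beq_iff_eq]
              exact fun h => hmem (by rw [← h]; exact (PySem.Set.mem_ofList _ _).mpr (List.mem_map_of_mem hp)))
          simp [pvSum, this]
        simp only [pvStep, hcont, if_false, Bool.false_eq_true,
          PySem.Dict.getD_insert_self, zero_add, PySem.Dict.insert_insert_self]
        rw [PySem.Dict.items_insert_of_not_contains _ _ hcont, ih,
          PySem.Set.add_of_not_mem hmem, List.map_append]
        congr 1
        · refine List.map_congr_left (fun c' hc' => ?_)
          have : c ≠ c' := fun h => hmem (h ▸ hc')
          simp [pvSum_append, this]
        · simp [pvSum_append, hz]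

-- ===== VERDICT (by name: the statement is the Claim_ definition above) =====
theorem calculate_class_totals_spec : Claim_equal_calculate_class_totals := by
  intro l _ hpre
  unfold Spec_calculate_class_totals calculate_class_totals calculate_class_totals_alt
  rw [a_reduces, core, b_keys_reduces l hpre, PySem.List.dedup_eq_ofList]
  exact List.map_congr_left (fun c _ => by rw [b_sum_reduces l c hpre])
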